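-- pv_equiv track=rewrite | github.com/nagaokayuji/programming-contest-solutions | archive/typical90/67.py | op
-- ===== SOURCE A (Python) =====
-- def op(n):
--     val = 0
--     b = 1
--     while n:
--         val += b * n.pop()
--         b *= 8
--
--     ret = []
--     while val:
--         x = val % 9
--         ret.append(x if x != 8 else 5)
--         val //= 9
--     while ret and ret[-1] == 0:
--         ret.pop()
--     return ret[::-1]
-- ===== SOURCE B (Python) =====
-- def op(n):
--     val = 0
--     for d in n:
--         val = val * 8 + d
--     n.clear()
--     ret = []
--     while val:
--         x = val % 9
--         ret = [5 if x == 8 else x] + ret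
--         val //= 9
--     return ret
-- ===== Notes on version B (the rewrite author's own statement) =====
-- stated objective: simpler
-- what changed: Phase 1 becomes a single Horner fold (val = val*8 + d, most-significant digit first, no running power and no pop), and the result is built back-to-front by prepending each base-9 digit, which makes A's trailing-zero strip and final reverse disappear.
import Mathlib
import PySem

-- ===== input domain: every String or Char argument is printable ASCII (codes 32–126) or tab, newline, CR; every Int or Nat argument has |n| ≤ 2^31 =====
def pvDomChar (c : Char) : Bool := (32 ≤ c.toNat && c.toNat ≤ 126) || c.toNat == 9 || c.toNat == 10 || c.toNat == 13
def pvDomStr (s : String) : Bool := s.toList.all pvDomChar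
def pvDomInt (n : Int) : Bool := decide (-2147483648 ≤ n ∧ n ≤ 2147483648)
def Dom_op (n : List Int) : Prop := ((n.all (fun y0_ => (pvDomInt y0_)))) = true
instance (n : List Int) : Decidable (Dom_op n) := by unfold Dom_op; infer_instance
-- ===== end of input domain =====

-- B: one Horner fold for phase 1 (no running power, no pop), and the base-9 result is
-- built back-to-front by prepending each digit, so A's trailing-zero strip and final
-- reverse disappear.  Both Pythons empty the argument list in place; the equivalence
-- proved here is about the return value.

-- ===== PORT A =====
-- while n: val += b * n.pop(); b *= 8   — pop() takes the last element, so fold over n.reverse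
-- while val: ... val //= 9              — for val ≥ 0 (all of Pre_) Python's loop is Nat
--                                         division; the port totalizes via val.toNat (on
--                                         negative val the Python loop never terminates).
def opDigits (v : Nat) : List Int :=
  if _h : v = 0 then []
  else (if v % 9 = 8 then (5 : Int) else ((v % 9 : Nat) : Int)) :: opDigits (v / 9)
decreasing_by exact Nat.div_lt_self (Nat.pos_of_ne_zero _h) (by norm_num)

-- while ret and ret[-1] == 0: ret.pop()
def opStrip (l : List Int) : List Int :=
  if h : l.getLast? = some 0 then opStrip l.dropLast else l
termination_by l.length
decreasing_by
  have hne : l ≠ [] := by intro e; subst e; simp at h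
  have : 0 < l.length := List.length_pos_iff.mpr hne
  simp [List.length_dropLast]; omega

def op (n : List Int) : List Int :=
  (opStrip (opDigits
      ((n.reverse.foldl (fun (p : Int × Int) d => (p.1 + p.2 * d, p.2 * 8)) (0, 1)).1.toNat))).reverse

-- ===== PORT B =====
-- while val: ret = [5 if x == 8 else x] + ret; val //= 9   — like A's loop this is Nat
-- division for val ≥ 0 and never terminates in Python for val < 0; totalized via toNat.
def bloop (v : Nat) (ret : List Int) : List Int :=
  if _h : v = 0 then ret
  else bloop (v / 9) ((if v % 9 = 8 then (5 : Int) else ((v % 9 : Nat) : Int)) :: ret)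
decreasing_by exact Nat.div_lt_self (Nat.pos_of_ne_zero _h) (by norm_num)

def op_alt (n : List Int) : List Int :=
  bloop (n.foldl (fun a d => a * 8 + d) 0).toNat []

-- ===== PRECONDITION & SPEC =====
-- No Pre_: on inputs whose base-8 value is negative neither Python returns (A's
-- `while val` loop never terminates, B's recursion never bottoms out); both ports
-- totalize that non-returning region identically via toNat, so equivalence of the
-- return values holds unconditionally.
def Spec_op (n : List Int) (out : List Int) : Prop := out = op_alt n
instance (n : List Int) (out : List Int) : Decidable (Spec_op n out) := by unfold Spec_op; infer_instance

-- ===== CLAIM (what is proved, stated in full; the proofs are below) =====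
def Claim_equal_op : Prop := ∀ (n : List Int), Dom_op n → Spec_op n (op n)

-- ===== LEMMAS AND PROOFS =====

-- value accumulated LSB-first (the order A pops in)
def lsbVal (l : List Int) : Int := l.foldr (fun d a => d + 8 * a) 0

theorem phase1_fold (l : List Int) (v b : Int) :
    (l.foldl (fun (p : Int × Int) d => (p.1 + p.2 * d, p.2 * 8)) (v, b)).1 = v + b * lsbVal l := by
  induction l generalizing v b with
  | nil => simp [lsbVal]
  | cons d t ih => simp only [List.foldl_cons, ih, lsbVal, List.foldr_cons]; ring

theorem horner_shift (t : List Int) (a : Int) :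
    t.foldl (fun a d => a * 8 + d) a = a * 8 ^ t.length + t.foldl (fun a d => a * 8 + d) 0 := by
  induction t generalizing a with
  | nil => simp
  | cons d s ih =>
      simp only [List.foldl_cons, List.length_cons]
      rw [ih (a * 8 + d), show (0 : Int) * 8 + d = d from by ring, ih d]
      ring

theorem lsb_shift (xs : List Int) (b : Int) :
    xs.foldr (fun d a => d + 8 * a) b = lsbVal xs + 8 ^ xs.length * b := by
  induction xs with
  | nil => simp [lsbVal]
  | cons x t ih => simp only [List.foldr_cons, lsbVal, List.length_cons] at *; rw [ih]; ring

theorem lsb_reverse (n : List Int) : lsbVal n.reverse = n.foldl (fun a d => a * 8 + d) 0 := by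
  induction n with
  | nil => simp [lsbVal]
  | cons d t ih =>
      simp only [List.reverse_cons, List.foldl_cons]
      show (t.reverse ++ [d]).foldr (fun d a => d + 8 * a) 0 = _
      rw [List.foldr_append]
      show t.reverse.foldr (fun d a => d + 8 * a) (d + 8 * 0) = _
      rw [lsb_shift, show (0 : Int) * 8 + d = d from by ring, horner_shift t d, ih]
      simp [List.length_reverse]
      ring

theorem bloop_eq_reverse (v : Nat) (acc : List Int) :
    bloop v acc = (opDigits v).reverse ++ acc := by
  induction v using Nat.strong_induction_on generalizing acc with
  | _ v ih =>
      by_cases h : v = 0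
      · rw [bloop, opDigits]; simp [h]
      · rw [bloop, opDigits,
          ih (v / 9) (Nat.div_lt_self (Nat.pos_of_ne_zero h) (by norm_num))]
        simp [h]

theorem opDigits_ne_nil (v : Nat) (h : v ≠ 0) : opDigits v ≠ [] := by
  rw [opDigits]; simp [h]

theorem opDigits_last (v : Nat) (h : v ≠ 0) : (opDigits v).getLast? ≠ some 0 := by
  induction v using Nat.strong_induction_on with
  | _ v ih =>
      rw [opDigits, dif_neg h]
      by_cases hq : v / 9 = 0
      · have hlt : v < 9 := by omega
        have hm : v % 9 = v := Nat.mod_eq_of_lt hlt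
        rw [opDigits, dif_pos hq]
        intro hc
        simp only [List.getLast?_singleton, Option.some.injEq] at hc
        split at hc
        · omega
        · rw [hm] at hc
          exact h (by exact_mod_cast hc)
      · obtain ⟨d', rest, he⟩ := List.exists_cons_of_ne_nil (opDigits_ne_nil _ hq)
        rw [he, List.getLast?_cons_cons]
        have := ih (v / 9) (Nat.div_lt_self (Nat.pos_of_ne_zero h) (by norm_num)) hq
        rw [he] at this
        exact this
  
theorem opStrip_id (l : List Int) (h : l.getLast? ≠ some 0) : opStrip l = l := by
  rw [opStrip, dif_neg h]

theorem opStrip_digits (v : Nat) : opStrip (opDigits v) = opDigits v := by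
  by_cases h : v = 0
  · subst h; rw [opDigits]; simp; rw [opStrip]; simp
  · exact opStrip_id _ (opDigits_last v h)

-- ===== VERDICT (by name: the statement is the Claim_ definition above) =====
theorem op_spec : Claim_equal_op := by
  intro n _
  show op n = op_alt n
  unfold op op_alt
  rw [phase1_fold, lsb_reverse, show (0 : Int) + 1 * n.foldl (fun a d => a * 8 + d) 0
      = n.foldl (fun a d => a * 8 + d) 0 from by ring,
    opStrip_digits, bloop_eq_reverse]
  simp
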